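-- pv_equiv track=rewrite | github.com/jms7446/hackerrank | baekjoon/old/p1043_liar.py | liar
-- ===== SOURCE A (Python) =====
-- def liar(checker_list, party_list):
--     checker_set = set(checker_list)
--     party_list = [set(party) for party in party_list]
--     while True:
--         pre_num_checker = len(checker_set)
--         for party in party_list:
--             if party.intersection(checker_set):
--                 checker_set = checker_set.union(party)
--         if len(checker_set) == pre_num_checker:
--             break
--     return sum(party.isdisjoint(checker_set) for party in party_list)
-- ===== SOURCE B (Python) =====
-- def liar(checker_list, party_list):
--     # Incremental component merging: one pass over the parties maintains
--     # disjoint member groups with a "contains a checker" flag; the answer is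
--     # read off per party by a single group lookup (no fixed-point rescans).
--     checkers = set(checker_list)
--     groups = []  # list of (member_set, contains_checker)
--     for party in party_list:
--         members = set(party)
--         flag = bool(members & checkers)
--         merged = []
--         rest = []
--         for g, f in groups:
--             if g & members:
--                 merged.append((g, f))
--             else:
--                 rest.append((g, f))
--         for g, f in merged:
--             members |= g
--             flag = flag or f
--         rest.append((members, flag))
--         groups = rest
--     count = 0
--     for party in party_list:
--         if not party:
--             count += 1
--         else:
--             x = party[0]
--             for g, f in groups:
--                 if x in g:
--                     if not f:
--                         count += 1
--                     break
--     return count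
-- ===== Notes on version B (the rewrite author's own statement) =====
-- stated objective: faster
-- what changed: B replaces A's repeated fixed-point rescans of the whole party list with incremental connected-component merging: one pass over the parties maintains disjoint member groups carrying a contains-a-checker flag, and the answer is read off by one group lookup per party, so no iteration-until-stable remains at all.
import Mathlib
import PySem

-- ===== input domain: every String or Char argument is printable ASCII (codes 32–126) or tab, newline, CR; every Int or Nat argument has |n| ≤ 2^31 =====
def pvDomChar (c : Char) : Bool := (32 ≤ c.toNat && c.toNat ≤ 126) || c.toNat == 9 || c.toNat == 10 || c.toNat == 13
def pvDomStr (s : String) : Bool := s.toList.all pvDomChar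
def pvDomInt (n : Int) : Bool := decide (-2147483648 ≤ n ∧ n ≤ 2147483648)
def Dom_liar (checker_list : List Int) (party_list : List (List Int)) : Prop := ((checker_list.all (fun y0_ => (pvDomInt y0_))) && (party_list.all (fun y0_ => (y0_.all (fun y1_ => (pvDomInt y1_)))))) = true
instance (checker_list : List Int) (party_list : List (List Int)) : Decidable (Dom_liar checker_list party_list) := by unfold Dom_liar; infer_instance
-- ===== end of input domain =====

-- B replaces A's iterate-until-stable rescans by incremental connected-component merging:
-- one pass over the parties maintains disjoint member groups with a contains-a-checker flag,
-- and the answer is one group lookup per party (objective: faster).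

-- ===== PORT A =====
-- one pass of A's inner `for party in party_list` loop
def pyPass (ps : List (List Int)) (S : List Int) : List Int :=
  ps.foldl (fun S p => if PySem.Set.inter p S ≠ [] then PySem.Set.union S p else S) S

-- lemmas cited by liarLoop's termination proof
theorem prefix_union (t s : List Int) : s <+: PySem.Set.union s t := by
  induction t generalizing s with
  | nil => exact List.prefix_refl s
  | cons x t ih =>
    have h1 : s <+: PySem.Set.add s x := by
      by_cases hx : x ∈ s
      · simp [PySem.Set.add_of_mem hx]
      · simp [PySem.Set.add_of_not_mem hx]
    exact h1.trans (ih (PySem.Set.add s x))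

theorem prefix_pyPass (ps : List (List Int)) (S : List Int) : S <+: pyPass ps S := by
  induction ps generalizing S with
  | nil => exact List.prefix_refl S
  | cons p ps ih =>
    show S <+: pyPass ps (if PySem.Set.inter p S ≠ [] then PySem.Set.union S p else S)
    split
    · exact (prefix_union p S).trans (ih _)
    · exact ih S

theorem mem_pyPass (ps : List (List Int)) (S : List Int) (x : Int) :
    x ∈ pyPass ps S → x ∈ S ∨ ∃ p ∈ ps, x ∈ p := by
  induction ps generalizing S with
  | nil => intro h; exact Or.inl h
  | cons p ps ih =>
    intro h
    have h' := ih (if PySem.Set.inter p S ≠ [] then PySem.Set.union S p else S) h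
    rcases h' with h' | ⟨q, hq, hxq⟩
    · by_cases hc : PySem.Set.inter p S ≠ []
      · rw [if_pos hc] at h'
        rcases (PySem.Set.mem_union _ _ _).mp h' with h'' | h''
        · exact Or.inl h''
        · exact Or.inr ⟨p, List.mem_cons_self, h''⟩
      · rw [if_neg hc] at h'; exact Or.inl h'
    · exact Or.inr ⟨q, List.mem_cons_of_mem _ hq, hxq⟩

theorem nodup_pyPass (ps : List (List Int)) (S : List Int) (h : S.Nodup) : (pyPass ps S).Nodup := by
  induction ps generalizing S with
  | nil => exact h
  | cons p ps ih =>
    show (pyPass ps (if PySem.Set.inter p S ≠ [] then PySem.Set.union S p else S)).Nodup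
    split
    · exact ih _ (PySem.Set.nodup_union _ _ h)
    · exact ih _ h

theorem nodup_len_le (l univ : List Int) (hnd : l.Nodup) (h : ∀ x ∈ l, x ∈ univ) :
    l.length ≤ (PySem.Set.ofList univ).length := by
  have hsub : l.toFinset ⊆ (PySem.Set.ofList univ).toFinset := by
    intro x hx
    rw [List.mem_toFinset] at hx ⊢
    exact (PySem.Set.mem_ofList _ _).mpr (h x hx)
  have h1 : l.toFinset.card = l.length := List.toFinset_card_of_nodup hnd
  have h2 : (PySem.Set.ofList univ).toFinset.card = (PySem.Set.ofList univ).length :=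
    List.toFinset_card_of_nodup (PySem.Set.nodup_ofList _)
  have := Finset.card_le_card hsub
  omega

-- A's `while True` loop; the Prop arguments only justify termination (the set grows, bounded by univ)
def liarLoop (ps : List (List Int)) (univ : List Int) (S : List Int)
    (hnd : S.Nodup) (hsub : ∀ x ∈ S, x ∈ univ) (hps : ∀ p ∈ ps, ∀ x ∈ p, x ∈ univ) : List Int :=
  if h : (pyPass ps S).length = S.length then pyPass ps S
  else
    liarLoop ps univ (pyPass ps S) (nodup_pyPass ps S hnd)
      (fun x hx => by
        rcases mem_pyPass ps S x hx with h' | ⟨p, hp, hxp⟩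
        · exact hsub x h'
        · exact hps p hp x hxp) hps
termination_by (PySem.Set.ofList univ).length + 1 - S.length
decreasing_by
  have h1 : S.length < (pyPass ps S).length := Nat.lt_of_le_of_ne (prefix_pyPass ps S).length_le (Ne.symm h)
  have h2 : (pyPass ps S).length ≤ (PySem.Set.ofList univ).length := by
    apply nodup_len_le _ _ (nodup_pyPass ps S hnd)
    intro x hx
    rcases mem_pyPass ps S x hx with h' | ⟨p, hp, hxp⟩
    · exact hsub x h'
    · exact hps p hp x hxp
  omega

theorem liar_univ_checkers (C : List Int) (P : List (List Int)) :
    ∀ x ∈ PySem.Set.ofList C, x ∈ C ++ P.flatten := by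
  intro x hx
  exact List.mem_append_left _ ((PySem.Set.mem_ofList _ _).mp hx)

theorem liar_univ_parties (C : List Int) (P : List (List Int)) :
    ∀ p ∈ P.map (fun q => PySem.Set.ofList q), ∀ x ∈ p, x ∈ C ++ P.flatten := by
  intro p hp x hx
  rcases List.mem_map.mp hp with ⟨q, hq, rfl⟩
  exact List.mem_append_right _ (List.mem_flatten.mpr ⟨q, hq, (PySem.Set.mem_ofList _ _).mp hx⟩)

def liar (checker_list : List Int) (party_list : List (List Int)) : Int :=
  let ps := party_list.map (fun p => PySem.Set.ofList p)
  let F := liarLoop ps (checker_list ++ party_list.flatten) (PySem.Set.ofList checker_list)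
    (PySem.Set.nodup_ofList _) (liar_univ_checkers checker_list party_list)
    (liar_univ_parties checker_list party_list)
  ps.foldl (fun acc p => acc + (if PySem.Set.isdisjoint p F then 1 else 0)) (0 : Int)

-- ===== PORT B =====
-- the inner `for g, f in groups` partition loop of Source B
def bPartition (groups : List (List Int × Bool)) (members : List Int) :
    List (List Int × Bool) × List (List Int × Bool) :=
  groups.foldl (fun acc gf =>
    if PySem.Set.inter gf.1 members ≠ [] then (acc.1 ++ [gf], acc.2) else (acc.1, acc.2 ++ [gf]))
    ([], [])

-- the `for g, f in merged` absorption loop of Source B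
def bMerge (members : List Int) (flag : Bool) (merged : List (List Int × Bool)) :
    List Int × Bool :=
  merged.foldl (fun mf gf => (PySem.Set.union mf.1 gf.1, mf.2 || gf.2)) (members, flag)

-- one iteration of Source B's `for party in party_list` grouping loop
def bAddParty (checkers : List Int) (groups : List (List Int × Bool)) (party : List Int) :
    List (List Int × Bool) :=
  let members := PySem.Set.ofList party
  let flag := decide (PySem.Set.inter members checkers ≠ [])
  let mr := bPartition groups members
  mr.2 ++ [bMerge members flag mr.1]

-- Source B's `for g, f in groups: if x in g: ...; break` lookup
def bLookup (groups : List (List Int × Bool)) (x : Int) : Int :=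
  match groups with
  | [] => 0
  | gf :: rest => if x ∈ gf.1 then (if gf.2 then 0 else 1) else bLookup rest x

def liar_alt (checker_list : List Int) (party_list : List (List Int)) : Int :=
  let checkers := PySem.Set.ofList checker_list
  let groups := party_list.foldl (bAddParty checkers) []
  party_list.foldl (fun cnt p =>
    match p with
    | [] => cnt + 1
    | x :: _ => cnt + bLookup groups x) (0 : Int)

-- ===== PRECONDITION & SPEC =====
def Spec_liar (checker_list : List Int) (party_list : List (List Int)) (out : Int) : Prop := out = liar_alt checker_list party_list
instance (checker_list : List Int) (party_list : List (List Int)) (out : Int) : Decidable (Spec_liar checker_list party_list out) := by unfold Spec_liar; infer_instance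

-- ===== CLAIM (what is proved, stated in full; the proofs are below) =====
def Claim_equal_liar : Prop := ∀ (checker_list : List Int) (party_list : List (List Int)), Dom_liar checker_list party_list → Spec_liar checker_list party_list (liar checker_list party_list)

-- ===== LEMMAS AND PROOFS =====

-- x is reachable: either a checker, or in a party one of whose members is reachable
inductive Reach (C : List Int) (ps : List (List Int)) : Int → Prop
  | base (x : Int) : x ∈ C → Reach C ps x
  | step (p : List Int) (x y : Int) : p ∈ ps → y ∈ p → Reach C ps y → x ∈ p → Reach C ps x

def closedOf (ps : List (List Int)) (S : List Int) : Prop :=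
  ∀ p ∈ ps, ∀ y ∈ p, y ∈ S → ∀ x ∈ p, x ∈ S

theorem inter_ne_nil (p S : List Int) : PySem.Set.inter p S ≠ [] ↔ ∃ y, y ∈ p ∧ y ∈ S := by
  constructor
  · intro h
    obtain ⟨y, hy⟩ := List.exists_mem_of_ne_nil _ h
    exact ⟨y, (PySem.Set.mem_inter _ _ _).mp hy⟩
  · rintro ⟨y, hyp, hyS⟩ hnil
    have := (PySem.Set.mem_inter p S y).mpr ⟨hyp, hyS⟩
    rw [hnil] at this
    exact List.not_mem_nil this

theorem pyPass_sound (C : List Int) (ps0 : List (List Int)) :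
    ∀ ps, (∀ p ∈ ps, p ∈ ps0) → ∀ S, (∀ x ∈ S, Reach C ps0 x) →
    ∀ x ∈ pyPass ps S, Reach C ps0 x := by
  intro ps
  induction ps with
  | nil => intro _ S hS x hx; exact hS x hx
  | cons p t ih =>
    intro hmem S hS x hx
    have hS' : ∀ z ∈ (if PySem.Set.inter p S ≠ [] then PySem.Set.union S p else S), Reach C ps0 z := by
      split
      · next hc =>
        intro z hz
        rcases (PySem.Set.mem_union _ _ _).mp hz with hz' | hz'
        · exact hS z hz'
        · obtain ⟨y, hyp, hyS⟩ := (inter_ne_nil p S).mp hc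
          exact Reach.step p z y (hmem p List.mem_cons_self) hyp (hS y hyS) hz'
      · exact hS
    exact ih (fun q hq => hmem q (List.mem_cons_of_mem _ hq)) _ hS' x hx

theorem pyPass_fix_closed (ps : List (List Int)) :
    ∀ S, pyPass ps S = S → closedOf ps S := by
  induction ps with
  | nil => intro S _ p hp; exact absurd hp List.not_mem_nil
  | cons p t ih =>
    intro S hfix
    have hpre1 : S <+: (if PySem.Set.inter p S ≠ [] then PySem.Set.union S p else S) := by
      split
      · exact prefix_union p S
      · exact List.prefix_refl S
    have hpass : pyPass t (if PySem.Set.inter p S ≠ [] then PySem.Set.union S p else S) = S := hfix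
    have hpre2 : (if PySem.Set.inter p S ≠ [] then PySem.Set.union S p else S) <+: S := by
      have h0 := prefix_pyPass t (if PySem.Set.inter p S ≠ [] then PySem.Set.union S p else S)
      rw [hpass] at h0; exact h0
    have hS1 : (if PySem.Set.inter p S ≠ [] then PySem.Set.union S p else S) = S :=
      hpre2.eq_of_length (Nat.le_antisymm hpre2.length_le hpre1.length_le)
    intro q hq y hy hyS x hx
    rcases List.mem_cons.mp hq with rfl | hq'
    · by_cases hc : PySem.Set.inter q S ≠ []
      · rw [if_pos hc] at hS1
        rw [← hS1]
        exact (PySem.Set.mem_union _ _ _).mpr (Or.inr hx)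
      · exact absurd ((inter_ne_nil q S).mpr ⟨y, hy, hyS⟩) hc
    · have htfix : pyPass t S = S := by rw [hS1] at hpass; exact hpass
      exact ih S htfix q hq' y hy hyS x hx

theorem liarLoop_prefix (ps : List (List Int)) (univ : List Int) (S : List Int)
    (hnd : S.Nodup) (hsub : ∀ x ∈ S, x ∈ univ) (hps : ∀ p ∈ ps, ∀ x ∈ p, x ∈ univ) :
    S <+: liarLoop ps univ S hnd hsub hps := by
  induction S, hnd, hsub using liarLoop.induct ps univ hps with
  | case1 S hnd hsub h =>
    rw [liarLoop, dif_pos h]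
    exact prefix_pyPass ps S
  | case2 S hnd hsub h ih =>
    rw [liarLoop, dif_neg h]
    exact (prefix_pyPass ps S).trans ih

theorem liarLoop_fix (ps : List (List Int)) (univ : List Int) (S : List Int)
    (hnd : S.Nodup) (hsub : ∀ x ∈ S, x ∈ univ) (hps : ∀ p ∈ ps, ∀ x ∈ p, x ∈ univ) :
    pyPass ps (liarLoop ps univ S hnd hsub hps) = liarLoop ps univ S hnd hsub hps := by
  induction S, hnd, hsub using liarLoop.induct ps univ hps with
  | case1 S hnd hsub h =>
    rw [liarLoop, dif_pos h]
    have hSS : S = pyPass ps S := (prefix_pyPass ps S).eq_of_length h.symm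
    rw [← hSS]
    exact hSS.symm
  | case2 S hnd hsub h ih =>
    rw [liarLoop, dif_neg h]
    exact ih

theorem liarLoop_sound (C : List Int) (ps : List (List Int)) (univ : List Int) (S : List Int)
    (hnd : S.Nodup) (hsub : ∀ x ∈ S, x ∈ univ) (hps : ∀ p ∈ ps, ∀ x ∈ p, x ∈ univ) :
    (∀ x ∈ S, Reach C ps x) →
    ∀ x ∈ liarLoop ps univ S hnd hsub hps, Reach C ps x := by
  induction S, hnd, hsub using liarLoop.induct ps univ hps with
  | case1 S hnd hsub h =>
    intro hS
    rw [liarLoop, dif_pos h]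
    exact pyPass_sound C ps ps (fun q hq => hq) S hS
  | case2 S hnd hsub h ih =>
    intro hS
    rw [liarLoop, dif_neg h]
    exact ih (pyPass_sound C ps ps (fun q hq => hq) S hS)

-- ---- B-side lemmas ----

theorem bPartition_gen (m : List Int) :
    ∀ (gs : List (List Int × Bool)) (a b : List (List Int × Bool)),
      gs.foldl (fun acc gf =>
        if PySem.Set.inter gf.1 m ≠ [] then (acc.1 ++ [gf], acc.2) else (acc.1, acc.2 ++ [gf])) (a, b)
      = (a ++ gs.filter (fun gf => decide (PySem.Set.inter gf.1 m ≠ [])),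
         b ++ gs.filter (fun gf => !decide (PySem.Set.inter gf.1 m ≠ []))) := by
  intro gs
  induction gs with
  | nil => intro a b; simp
  | cons gf t ih =>
    intro a b
    by_cases h : PySem.Set.inter gf.1 m ≠ []
    · simp only [List.foldl_cons, if_pos h, ih, List.filter_cons]
      simp [h]
    · simp only [List.foldl_cons, if_neg h, ih, List.filter_cons]
      simp [h]

theorem bPartition_eq (gs : List (List Int × Bool)) (m : List Int) :
    bPartition gs m =
      (gs.filter (fun gf => decide (PySem.Set.inter gf.1 m ≠ [])),
       gs.filter (fun gf => !decide (PySem.Set.inter gf.1 m ≠ []))) := by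
  unfold bPartition
  rw [bPartition_gen]
  simp

theorem mem_merged {gs : List (List Int × Bool)} {m : List Int} {gf : List Int × Bool} :
    gf ∈ (bPartition gs m).1 ↔ gf ∈ gs ∧ PySem.Set.inter gf.1 m ≠ [] := by
  rw [bPartition_eq]
  simp [List.mem_filter]

theorem mem_rest {gs : List (List Int × Bool)} {m : List Int} {gf : List Int × Bool} :
    gf ∈ (bPartition gs m).2 ↔ gf ∈ gs ∧ PySem.Set.inter gf.1 m = [] := by
  rw [bPartition_eq]
  simp [List.mem_filter]

theorem mem_bMerge_fst (members : List Int) (flag : Bool) (merged : List (List Int × Bool)) (x : Int) :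
    x ∈ (bMerge members flag merged).1 ↔ x ∈ members ∨ ∃ gf ∈ merged, x ∈ gf.1 := by
  induction merged generalizing members flag with
  | nil => simp [bMerge]
  | cons gf t ih =>
    show x ∈ (bMerge (PySem.Set.union members gf.1) (flag || gf.2) t).1 ↔ _
    rw [ih]
    constructor
    · rintro (h | ⟨g, hg, hx⟩)
      · rcases (PySem.Set.mem_union _ _ _).mp h with h | h
        · exact Or.inl h
        · exact Or.inr ⟨gf, List.mem_cons_self, h⟩
      · exact Or.inr ⟨g, List.mem_cons_of_mem _ hg, hx⟩
    · rintro (h | ⟨g, hg, hx⟩)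
      · exact Or.inl ((PySem.Set.mem_union _ _ _).mpr (Or.inl h))
      · rcases List.mem_cons.mp hg with rfl | hg'
        · exact Or.inl ((PySem.Set.mem_union _ _ _).mpr (Or.inr hx))
        · exact Or.inr ⟨g, hg', hx⟩

theorem bMerge_snd (members : List Int) (flag : Bool) (merged : List (List Int × Bool)) :
    (bMerge members flag merged).2 = (flag || merged.any (·.2)) := by
  induction merged generalizing members flag with
  | nil => simp [bMerge]
  | cons gf t ih =>
    show (bMerge (PySem.Set.union members gf.1) (flag || gf.2) t).2 = _
    rw [ih]
    simp [Bool.or_assoc]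

-- invariant of Source B's grouping pass: groups are (a) all-in-or-all-out of F,
-- (b) flagged iff containing a checker, (c) pairwise disjoint, (d) cover each processed party
def GoodGroups (C F : List Int) (done : List (List Int)) (gs : List (List Int × Bool)) : Prop :=
  (∀ gf ∈ gs, (∃ y ∈ gf.1, y ∈ F) → ∀ x ∈ gf.1, x ∈ F) ∧
  (∀ gf ∈ gs, gf.2 = true ↔ ∃ c ∈ gf.1, c ∈ C) ∧
  (∀ a ∈ gs, ∀ b ∈ gs, a ≠ b → ∀ x ∈ a.1, x ∉ b.1) ∧
  (∀ q ∈ done, ∃ gf ∈ gs, ∀ x ∈ q, x ∈ gf.1)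

theorem bAddParty_good (C F : List Int) (ps : List (List Int)) (hcl : closedOf ps F)
    (done : List (List Int)) (gs : List (List Int × Bool)) (p : List Int)
    (hp : PySem.Set.ofList p ∈ ps) (h : GoodGroups C F done gs) :
    GoodGroups C F (done ++ [PySem.Set.ofList p]) (bAddParty C gs p) := by
  obtain ⟨ha, hb, hc, hd⟩ := h
  set m := PySem.Set.ofList p with hm
  set fl := decide (PySem.Set.inter m C ≠ []) with hfl
  set P1 := (bPartition gs m).1 with hP1
  set P2 := (bPartition gs m).2 with hP2
  set M := bMerge m fl P1 with hMdef
  have hsplit : ∀ gf ∈ gs, gf ∈ P1 ∨ gf ∈ P2 := by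
    intro gf hgf
    by_cases hi : PySem.Set.inter gf.1 m = []
    · exact Or.inr (mem_rest.mpr ⟨hgf, hi⟩)
    · exact Or.inl (mem_merged.mpr ⟨hgf, hi⟩)
  have hunfold : bAddParty C gs p = P2 ++ [M] := rfl
  rw [hunfold]
  have hmemNew : ∀ a : List Int × Bool, a ∈ P2 ++ [M] ↔ a ∈ P2 ∨ a = M := by
    intro a; simp
  -- (a)
  have haM : (∃ y ∈ M.1, y ∈ F) → ∀ x ∈ M.1, x ∈ F := by
    rintro ⟨y, hy, hyF⟩
    have hmF : ∀ z ∈ m, z ∈ F := by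
      rcases (mem_bMerge_fst m fl P1 y).mp hy with hym | ⟨gi, hgi, hygi⟩
      · exact hcl m hp y hym hyF
      · have hgi' := mem_merged.mp hgi
        have hgiF : ∀ z ∈ gi.1, z ∈ F := ha gi hgi'.1 ⟨y, hygi, hyF⟩
        obtain ⟨w, hwgi, hwm⟩ := (inter_ne_nil _ _).mp hgi'.2
        exact hcl m hp w hwm (hgiF w hwgi)
    intro x hx
    rcases (mem_bMerge_fst m fl P1 x).mp hx with hxm | ⟨gj, hgj, hxgj⟩
    · exact hmF x hxm
    · have hgj' := mem_merged.mp hgj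
      obtain ⟨w, hwgj, hwm⟩ := (inter_ne_nil _ _).mp hgj'.2
      exact ha gj hgj'.1 ⟨w, hwgj, hmF w hwm⟩ x hxgj
  refine ⟨?_, ?_, ?_, ?_⟩
  · intro gf hgf
    rcases (hmemNew gf).mp hgf with hgf2 | rfl
    · exact ha gf (mem_rest.mp hgf2).1
    · exact haM
  -- (b)
  · intro gf hgf
    rcases (hmemNew gf).mp hgf with hgf2 | rfl
    · exact hb gf (mem_rest.mp hgf2).1
    · constructor
      · intro htrue
        rw [hMdef, bMerge_snd] at htrue
        rcases Bool.or_eq_true_iff.mp htrue with hfl' | hany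
        · obtain ⟨c, hcm, hcC⟩ := (inter_ne_nil _ _).mp (of_decide_eq_true hfl')
          exact ⟨c, (mem_bMerge_fst m fl P1 c).mpr (Or.inl hcm), hcC⟩
        · obtain ⟨gi, hgi, hgi2⟩ := List.any_eq_true.mp hany
          obtain ⟨c, hcgi, hcC⟩ := (hb gi (mem_merged.mp hgi).1).mp (by simpa using hgi2)
          exact ⟨c, (mem_bMerge_fst m fl P1 c).mpr (Or.inr ⟨gi, hgi, hcgi⟩), hcC⟩
      · rintro ⟨c, hcM, hcC⟩
        rw [hMdef, bMerge_snd]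
        rcases (mem_bMerge_fst m fl P1 c).mp hcM with hcm | ⟨gi, hgi, hcgi⟩
        · have : fl = true := decide_eq_true ((inter_ne_nil _ _).mpr ⟨c, hcm, hcC⟩)
          rw [this]; simp
        · have : gi.2 = true := (hb gi (mem_merged.mp hgi).1).mpr ⟨c, hcgi, hcC⟩
          apply Bool.or_eq_true_iff.mpr
          exact Or.inr (List.any_eq_true.mpr ⟨gi, hgi, by simpa using this⟩)
  -- (c)
  · intro a haN b hbN hne x hxa hxb
    rcases (hmemNew a).mp haN with ha2 | rfl <;> rcases (hmemNew b).mp hbN with hb2 | rfl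
    · exact hc a (mem_rest.mp ha2).1 b (mem_rest.mp hb2).1 hne x hxa hxb
    · -- a ∈ P2, b = M
      rcases (mem_bMerge_fst m fl P1 x).mp hxb with hxm | ⟨gi, hgi, hxgi⟩
      · exact (inter_ne_nil a.1 m).mpr ⟨x, hxa, hxm⟩ (mem_rest.mp ha2).2
      · have hane : a ≠ gi := by
          intro e
          exact (e ▸ (mem_merged.mp hgi).2) (mem_rest.mp ha2).2
        exact hc a (mem_rest.mp ha2).1 gi (mem_merged.mp hgi).1 hane x hxa hxgi
    · -- a = M, b ∈ P2
      rcases (mem_bMerge_fst m fl P1 x).mp hxa with hxm | ⟨gi, hgi, hxgi⟩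
      · exact (inter_ne_nil b.1 m).mpr ⟨x, hxb, hxm⟩ (mem_rest.mp hb2).2
      · have hgne : gi ≠ b := by
          intro e
          exact (e ▸ (mem_merged.mp hgi).2) (mem_rest.mp hb2).2
        exact hc gi (mem_merged.mp hgi).1 b (mem_rest.mp hb2).1 hgne x hxgi hxb
    · exact hne rfl
  -- (d)
  · intro q hq
    rcases List.mem_append.mp hq with hq2 | hq2
    · obtain ⟨gf, hgf, hsub⟩ := hd q hq2
      rcases hsplit gf hgf with h1 | h2
      · exact ⟨M, by simp, fun x hx => (mem_bMerge_fst m fl P1 x).mpr (Or.inr ⟨gf, h1, hsub x hx⟩)⟩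
      · exact ⟨gf, List.mem_append_left _ h2, hsub⟩
    · have hqm : q = m := by simpa using hq2
      subst hqm
      exact ⟨M, by simp, fun x hx => (mem_bMerge_fst m fl P1 x).mpr (Or.inl hx)⟩

theorem bGroups_good (C F : List Int) (ps : List (List Int)) (hcl : closedOf ps F) :
    ∀ (rest : List (List Int)) (done : List (List Int)) (gs : List (List Int × Bool)),
      (∀ p ∈ rest, PySem.Set.ofList p ∈ ps) → GoodGroups C F done gs →
      GoodGroups C F (done ++ rest.map (fun p => PySem.Set.ofList p)) (rest.foldl (bAddParty C) gs) := by
  intro rest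
  induction rest with
  | nil => intro done gs _ h; simpa using h
  | cons p t ih =>
    intro done gs hmem h
    have h1 := bAddParty_good C F ps hcl done gs p (hmem p List.mem_cons_self) h
    have h2 := ih (done ++ [PySem.Set.ofList p]) (bAddParty C gs p)
      (fun q hq => hmem q (List.mem_cons_of_mem _ hq)) h1
    simpa [List.append_assoc] using h2

-- at the end every reachable member sits in a group that contains a checker
theorem reach_flag (C F : List Int) (ps : List (List Int)) (G : List (List Int × Bool))
    (hgood : GoodGroups C F ps G) :
    ∀ x, Reach C ps x → ∀ g ∈ G, x ∈ g.1 → ∃ c ∈ g.1, c ∈ C := by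
  intro x hx
  induction hx with
  | base x h => intro g _ hxg; exact ⟨x, hxg, h⟩
  | step p x y hp hyp _ hxp ih =>
    intro g hg hxg
    obtain ⟨g', hg', hsub⟩ := hgood.2.2.2 p hp
    by_cases hgg : g = g'
    · subst hgg
      exact ih g hg (hsub y hyp)
    · exact absurd hxg (hgood.2.2.1 g' hg' g hg (fun e => hgg e.symm) x (hsub x hxp))

theorem bLookup_spec (G : List (List Int × Bool)) (x : Int) (g : List Int × Bool)
    (hg : g ∈ G) (hx : x ∈ g.1)
    (hdisj : ∀ a ∈ G, ∀ b ∈ G, a ≠ b → ∀ z ∈ a.1, z ∉ b.1) :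
    bLookup G x = if g.2 then 0 else 1 := by
  induction G with
  | nil => exact absurd hg List.not_mem_nil
  | cons h t ih =>
    by_cases hxh : x ∈ h.1
    · have hgh : g = h := by
        by_contra hne
        exact hdisj g hg h List.mem_cons_self hne x hx hxh
      rw [bLookup, if_pos hxh, hgh]
    · have hgne : g ≠ h := fun e => hxh (e ▸ hx)
      have hgt : g ∈ t := by
        rcases List.mem_cons.mp hg with rfl | h' 
        · exact absurd rfl hgne
        · exact h'
      rw [bLookup, if_neg hxh]
      exact ih hgt (fun a ha b hb => hdisj a (List.mem_cons_of_mem _ ha) b (List.mem_cons_of_mem _ hb))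

theorem liar_main (C : List Int) (P : List (List Int)) : liar C P = liar_alt C P := by
  show (P.map (fun p => PySem.Set.ofList p)).foldl
      (fun acc p => acc + (if PySem.Set.isdisjoint p _ then 1 else 0)) (0 : Int) = _
  set ps := P.map (fun p => PySem.Set.ofList p) with hps
  set Ck := PySem.Set.ofList C with hCk
  set F := liarLoop ps (C ++ P.flatten) Ck
    (PySem.Set.nodup_ofList _) (liar_univ_checkers C P) (liar_univ_parties C P) with hF
  set G := P.foldl (bAddParty Ck) [] with hG
  have hcl : closedOf ps F :=
    pyPass_fix_closed ps F (liarLoop_fix ps (C ++ P.flatten) Ck _ _ _)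
  have hCF : ∀ c ∈ Ck, c ∈ F := fun c hc =>
    (liarLoop_prefix ps (C ++ P.flatten) Ck _ _ _).subset hc
  have hFr : ∀ x ∈ F, Reach Ck ps x :=
    liarLoop_sound Ck ps (C ++ P.flatten) Ck _ _ _ (fun x hx => Reach.base x hx)
  have hgood : GoodGroups Ck F ps G := by
    have h0 := bGroups_good Ck F ps hcl P [] []
      (fun q hq => List.mem_map_of_mem hq)
      ⟨by simp, by simp, by simp, by simp⟩
    simpa [hps, hG] using h0
  have hcontrib : ∀ p ∈ P,
      (if PySem.Set.isdisjoint (PySem.Set.ofList p) F then (1 : Int) else 0)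
        = (match p with | [] => (1 : Int) | x :: _ => bLookup G x) := by
    intro p hpP
    cases p with
    | nil => simp [PySem.Set.isdisjoint]
    | cons x t =>
      obtain ⟨g, hg, hsub⟩ := hgood.2.2.2 (PySem.Set.ofList (x :: t))
        (List.mem_map_of_mem hpP)
      have hxg : x ∈ g.1 := hsub x ((PySem.Set.mem_ofList _ _).mpr List.mem_cons_self)
      show _ = bLookup G x
      rw [bLookup_spec G x g hg hxg hgood.2.2.1]
      cases hgflag : g.2 with
      | true =>
        obtain ⟨c, hcg, hcC⟩ := (hgood.2.1 g hg).mp hgflag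
        have hgF : ∀ z ∈ g.1, z ∈ F := hgood.1 g hg ⟨c, hcg, hCF c hcC⟩
        have hnd : ¬ PySem.Set.isdisjoint (PySem.Set.ofList (x :: t)) F = true := by
          rw [PySem.Set.isdisjoint_iff]
          intro hall
          exact hall x ((PySem.Set.mem_ofList _ _).mpr List.mem_cons_self) (hgF x hxg)
        simp [hnd]
      | false =>
        have hdj : PySem.Set.isdisjoint (PySem.Set.ofList (x :: t)) F = true := by
          rw [PySem.Set.isdisjoint_iff]
          intro z hz hzF
          obtain ⟨c, hcg, hcC⟩ := reach_flag Ck F ps G hgood z (hFr z hzF) g hg (hsub z hz)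
          have := (hgood.2.1 g hg).mpr ⟨c, hcg, hcC⟩
          rw [hgflag] at this
          exact Bool.false_ne_true this
        simp [hdj]
  show ps.foldl (fun acc p => acc + (if PySem.Set.isdisjoint p F then 1 else 0)) (0 : Int)
      = P.foldl (fun cnt p => match p with
          | [] => cnt + 1
          | x :: _ => cnt + bLookup G x) (0 : Int)
  rw [hps, List.foldl_map]
  apply PySem.List.foldl_congr_mem'
  intro p hpP acc
  cases p with
  | nil =>
    show acc + _ = acc + 1
    rw [hcontrib [] hpP]
  | cons x t =>
    show acc + _ = acc + bLookup G x
    rw [hcontrib (x :: t) hpP]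

-- ===== VERDICT (by name: the statement is the Claim_ definition above) =====
theorem liar_spec : Claim_equal_liar := by
  intro C P _
  unfold Spec_liar
  exact liar_main C P
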